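-- pv_equiv track=rewrite | github.com/t-bullock/kassia | kassia.py | _replace_ligatures
-- ===== SOURCE A (Python) =====
-- from typing import Any, Dict, List, Iterator
--
-- def _replace_ligatures(neume_chunk_name: str, neume_config: Dict) -> List[str]:
--     """Tries to replace neume combinations with ligatures within a neume group.
--
--     Works by chopping off the last neume in the chunk and checking
--     the remainder to see if it matches any ligatures in the neume config list.
--
--     param: neume_chunk_name: Name of neume chunk (neume names joined by underscores).
--     param: neume_config: Font configuration information from yaml.
--     returns: List of neume names, with neume ligatures used.
--     todo: Add additional check for ligatures from first neume towards back.
--     """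
--     possible_lig = neume_chunk_name
--     neume_list = []
--     while possible_lig.count('_') >= 1:
--         if possible_lig in neume_config['glyphnames']:
--             neume_list.insert(0, possible_lig)
--             return neume_list
--         possible_lig, remainder = possible_lig.rsplit('_', 1)
--         neume_list.insert(0, remainder)
--
--     neume_list.insert(0, possible_lig)
--
--     return neume_list
-- ===== SOURCE B (Python) =====
-- def _replace_ligatures(neume_chunk_name, neume_config):
--     parts = neume_chunk_name.split('_')
--     for k in range(len(parts), 1, -1):
--         prefix = '_'.join(parts[:k])
--         if prefix in neume_config['glyphnames']:
--             return [prefix] + parts[k:]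
--     return parts
-- ===== Notes on version B (the rewrite author's own statement) =====
-- stated objective: simpler
-- what changed: B splits the name once into its '_'-separated parts and tests joined prefixes parts[:k] for k = len(parts) down to 2, instead of A's while loop that repeatedly rsplits the string from the back while inserting remainders at position 0 of the result list.
import Mathlib
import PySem

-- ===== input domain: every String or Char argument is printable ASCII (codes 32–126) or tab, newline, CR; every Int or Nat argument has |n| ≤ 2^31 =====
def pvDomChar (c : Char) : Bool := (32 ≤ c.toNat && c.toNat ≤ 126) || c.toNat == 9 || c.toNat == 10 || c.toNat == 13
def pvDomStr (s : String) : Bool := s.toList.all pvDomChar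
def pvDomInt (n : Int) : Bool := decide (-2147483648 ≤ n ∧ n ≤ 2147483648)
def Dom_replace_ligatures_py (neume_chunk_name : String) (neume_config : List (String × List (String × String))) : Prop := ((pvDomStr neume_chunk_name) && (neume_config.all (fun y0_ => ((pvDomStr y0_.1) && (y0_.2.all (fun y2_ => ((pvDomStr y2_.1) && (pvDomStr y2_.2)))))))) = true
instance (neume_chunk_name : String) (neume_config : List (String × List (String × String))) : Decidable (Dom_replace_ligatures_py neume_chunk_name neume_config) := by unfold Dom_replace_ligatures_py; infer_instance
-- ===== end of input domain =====

-- B replaces A's repeated rsplit-from-the-back loop by one split('_') plus a countdown over prefix lengths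
-- with index-based joins (objective: simpler); return values proved equal on Pre_.

-- ===== PORT A =====

-- hand port of possible_lig.rsplit('_', 1) (no PySem primitive for rsplit): exact whenever '_' ∈ cs,
-- which A's loop guard (count('_') >= 1) guarantees at every call site; the last branch is unreachable there.
def pvRsplit1 (cs : List Char) : List Char × List Char :=
  match cs with
  | [] => ([], [])
  | c :: rest =>
    if '_' ∈ rest then (c :: (pvRsplit1 rest).1, (pvRsplit1 rest).2)
    else if c = '_' then ([], rest)
    else (c :: rest, [])

-- used by loopA's decreasing_by
lemma pvRsplit1_fst_length : ∀ (cs : List Char), '_' ∈ cs → (pvRsplit1 cs).1.length < cs.length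
  | c :: rest, h => by
    by_cases hr : '_' ∈ rest
    · have := pvRsplit1_fst_length rest hr
      simp only [pvRsplit1, if_pos hr]
      simpa using this
    · have hc : c = '_' := by
        rcases List.mem_cons.mp h with h1 | h2
        · exact h1.symm
        · exact absurd h2 hr
      simp [pvRsplit1, hr, hc]

lemma countGo_single : ∀ (l : List Char) (fuel acc : Nat), l.length ≤ fuel →
    PySem.Chars.count.go ['_'] fuel l acc = acc + l.count '_' := by
  intro l
  induction l with
  | nil => intro fuel acc _; cases fuel <;> simp [PySem.Chars.count.go]
  | cons c t ih =>
    intro fuel acc hf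
    cases fuel with
    | zero => simp at hf
    | succ f =>
      by_cases hc : c = '_'
      · subst hc
        simp only [PySem.Chars.count.go, List.isPrefixOf]
        rw [if_pos (by simp)]
        rw [show List.drop ['_'].length ('_' :: t) = t from rfl]
        rw [ih f (acc + 1) (by simpa using hf)]
        simp
        omega
      · simp only [PySem.Chars.count.go, List.isPrefixOf]
        rw [if_neg (by simp; exact fun h => hc h.symm)]
        rw [ih f acc (by simpa using hf)]
        simp [hc]

-- used by loopA's decreasing_by
lemma count_single (cs : List Char) : PySem.Chars.count cs ['_'] = cs.count '_' := by
  rw [PySem.Chars.count]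
  rw [if_neg (by simp)]
  rw [countGo_single cs cs.length 0 le_rfl]
  omega

-- A's while loop: possible_lig = cs, neume_list = acc; the glyphnames dict is g.
def loopA (g : PySem.Dict String String) (cs : List Char) (acc : List String) : List String :=
  if h : 1 ≤ PySem.Chars.count cs ['_'] then
    if g.contains (String.mk cs) then String.mk cs :: acc
    else loopA g (pvRsplit1 cs).1 (String.mk (pvRsplit1 cs).2 :: acc)
  else String.mk cs :: acc
termination_by cs.length
decreasing_by
  exact pvRsplit1_fst_length cs (by
    rw [count_single] at h
    exact List.count_pos_iff.mp h)

-- neume_config['glyphnames'] : .getD [] is unreachable when the loop body runs (Pre_ excludes the KeyError)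
def replace_ligatures_py (neume_chunk_name : String) (neume_config : List (String × List (String × String))) : List String :=
  loopA ⟨(PySem.Dict.get? ⟨neume_config⟩ "glyphnames").getD []⟩ neume_chunk_name.toList []

-- ===== PORT B =====

-- B's countdown loop: for k in range(len(parts), 1, -1): test '_'.join(parts[:k]).
def loopB (g : PySem.Dict String String) (parts : List (List Char)) (k : Nat) : List String :=
  if h : 2 ≤ k then
    if g.contains (String.mk (PySem.Chars.join ['_'] (parts.take k))) then
      String.mk (PySem.Chars.join ['_'] (parts.take k)) :: (parts.drop k).map String.mk
    else loopB g parts (k - 1)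
  else parts.map String.mk
termination_by k
decreasing_by omega

def replace_ligatures_py_alt (neume_chunk_name : String) (neume_config : List (String × List (String × String))) : List String :=
  let parts := PySem.Chars.splitOn neume_chunk_name.toList ['_']
  loopB ⟨(PySem.Dict.get? ⟨neume_config⟩ "glyphnames").getD []⟩ parts parts.length

-- ===== PRECONDITION & SPEC =====
-- Pre_ excludes exactly the KeyError: if the name contains '_' the loop body runs and both Pythons
-- look up neume_config['glyphnames'], raising when that key is absent.
def Pre_replace_ligatures_py (neume_chunk_name : String) (neume_config : List (String × List (String × String))) : Prop :=
  PySem.Str.isIn "_" neume_chunk_name = true → ((PySem.Dict.get? ⟨neume_config⟩ "glyphnames").isSome = true)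
instance (neume_chunk_name : String) (neume_config : List (String × List (String × String))) : Decidable (Pre_replace_ligatures_py neume_chunk_name neume_config) := by unfold Pre_replace_ligatures_py; infer_instance

def pvWitness_replace_ligatures_py : String × (List (String × List (String × String))) :=
  ("a_b", [("glyphnames", [("a_b", "g1")])])

def Spec_replace_ligatures_py (neume_chunk_name : String) (neume_config : List (String × List (String × String))) (out : List String) : Prop := out = replace_ligatures_py_alt neume_chunk_name neume_config
instance (neume_chunk_name : String) (neume_config : List (String × List (String × String))) (out : List String) : Decidable (Spec_replace_ligatures_py neume_chunk_name neume_config out) := by unfold Spec_replace_ligatures_py; infer_instance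

-- ===== CLAIM (what is proved, stated in full; the proofs are below) =====
def Claim_equal_replace_ligatures_py : Prop := ∀ (neume_chunk_name : String) (neume_config : List (String × List (String × String))), Dom_replace_ligatures_py neume_chunk_name neume_config → Pre_replace_ligatures_py neume_chunk_name neume_config → Spec_replace_ligatures_py neume_chunk_name neume_config (replace_ligatures_py neume_chunk_name neume_config)

-- ===== LEMMAS AND PROOFS =====

-- the common shape both loops reduce to: chop parts off the back, longest joined prefix first
def auxR (g : PySem.Dict String String) (ps : List (List Char)) (acc : List String) : List String :=
  if h : 2 ≤ ps.length then
    if g.contains (String.mk (['_'].intercalate ps)) then String.mk (['_'].intercalate ps) :: acc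
    else auxR g ps.dropLast (String.mk (ps.getLast (by rintro rfl; simp at h)) :: acc)
  else String.mk (['_'].intercalate ps) :: acc
termination_by ps.length
decreasing_by simp [List.length_dropLast]; omega

lemma splitGo_single : ∀ (l : List Char) (fuel : Nat) (cur : List Char) (acc : List (List Char)),
    l.length < fuel →
    PySem.Chars.splitOn.go ['_'] fuel l cur acc
      = acc.reverse ++ List.modifyHead (cur.reverse ++ ·) (List.splitOnP (· == '_') l) := by
  intro l
  induction l with
  | nil =>
    intro fuel cur acc hf
    cases fuel with
    | zero => simp at hf
    | succ f => simp [PySem.Chars.splitOn.go, List.splitOnP_nil]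
  | cons c t ih =>
    intro fuel cur acc hf
    cases fuel with
    | zero => simp at hf
    | succ f =>
      by_cases hc : c = '_'
      · subst hc
        simp only [PySem.Chars.splitOn.go, List.isPrefixOf]
        rw [if_pos (by simp)]
        rw [show List.drop ['_'].length ('_' :: t) = t from rfl]
        rw [ih f [] (cur.reverse :: acc) (by simpa using hf)]
        rcases hsp : List.splitOnP (fun x => x == '_') t with _ | ⟨h₁, tl⟩
        · exact absurd hsp (List.splitOnP_ne_nil _ t)
        · simp [List.splitOnP_cons, hsp]
      · simp only [PySem.Chars.splitOn.go, List.isPrefixOf]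
        rw [if_neg (by simp; exact fun h => hc h.symm)]
        rw [ih f (c :: cur) acc (by simpa using hf)]
        rcases hsp : List.splitOnP (fun x => x == '_') t with _ | ⟨h₁, tl⟩
        · exact absurd hsp (List.splitOnP_ne_nil _ t)
        · simp [List.splitOnP_cons, hsp, hc]

lemma chars_splitOn_single (cs : List Char) :
    PySem.Chars.splitOn cs ['_'] = List.splitOnP (· == '_') cs := by
  rw [PySem.Chars.splitOn, splitGo_single cs (cs.length + 1) [] [] (by omega)]
  rcases hsp : List.splitOnP (fun x => x == '_') cs with _ | ⟨h₁, tl⟩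
  · exact absurd hsp (List.splitOnP_ne_nil _ cs)
  · simp

lemma not_mem_splitOnP (cs : List Char) : ∀ p ∈ List.splitOnP (· == '_') cs, '_' ∉ p := by
  induction cs with
  | nil => intro p hp; simp [List.splitOnP_nil] at hp; simp [hp]
  | cons c t ih =>
    intro p hp
    by_cases hc : c = '_'
    · subst hc
      rw [List.splitOnP_cons, if_pos (by simp)] at hp
      rcases List.mem_cons.mp hp with rfl | h2
      · simp
      · exact ih p h2
    · rw [List.splitOnP_cons, if_neg (by simp [hc])] at hp
      rcases hsp : List.splitOnP (fun x => x == '_') t with _ | ⟨h₁, tl⟩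
      · exact absurd hsp (List.splitOnP_ne_nil _ t)
      · rw [hsp] at hp
        rcases List.mem_cons.mp hp with rfl | h2
        · intro hmem
          rcases List.mem_cons.mp hmem with h3 | h4
          · exact hc h3.symm
          · exact ih h₁ (by rw [hsp]; exact List.mem_cons_self) h4
        · exact ih p (by rw [hsp]; exact List.mem_cons_of_mem _ h2)

lemma intercalate_cons_of_ne_nil (p : List Char) (l : List (List Char)) (h : l ≠ []) :
    ['_'].intercalate (p :: l) = p ++ '_' :: ['_'].intercalate l := by
  rcases l with _ | ⟨q, t⟩
  · exact absurd rfl h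
  · simp [List.intercalate, List.intersperse]

lemma intercalate_snoc (ps : List (List Char)) (q : List Char) (h : ps ≠ []) :
    ['_'].intercalate (ps ++ [q]) = ['_'].intercalate ps ++ '_' :: q := by
  induction ps with
  | nil => exact absurd rfl h
  | cons p t ih =>
    rcases eq_or_ne t [] with rfl | ht
    · simp [List.intercalate, List.intersperse]
    · rw [List.cons_append, intercalate_cons_of_ne_nil p (t ++ [q]) (by simp),
        intercalate_cons_of_ne_nil p t ht, ih ht]
      simp

lemma pvRsplit1_append (p t : List Char) (ht : '_' ∈ t) :
    pvRsplit1 (p ++ t) = (p ++ (pvRsplit1 t).1, (pvRsplit1 t).2) := by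
  induction p with
  | nil => simp
  | cons c p' ih =>
    have hmem : '_' ∈ p' ++ t := List.mem_append.mpr (Or.inr ht)
    simp only [List.cons_append, pvRsplit1, if_pos hmem, ih]

lemma pvRsplit1_sep (q : List Char) (hq : '_' ∉ q) : pvRsplit1 ('_' :: q) = ([], q) := by
  simp [pvRsplit1, hq]

lemma loopA_eq_auxR (g : PySem.Dict String String) (ps : List (List Char)) :
    ps ≠ [] → (∀ p ∈ ps, '_' ∉ p) → ∀ acc,
    loopA g (['_'].intercalate ps) acc = auxR g ps acc := by
  induction ps using List.reverseRecOn with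
  | nil => intro h _ _; exact absurd rfl h
  | append_singleton ps q ih =>
    intro _ hnp acc
    have hq : '_' ∉ q := hnp q (by simp)
    rcases eq_or_ne ps [] with rfl | hps
    · -- single part: the loop never runs
      simp only [List.nil_append]
      have hcount : PySem.Chars.count (['_'].intercalate [q]) ['_'] = 0 := by
        rw [count_single]
        simp [List.intercalate, List.count_eq_zero, hq]
      rw [loopA, auxR]
      rw [dif_neg (by rw [hcount]; omega), dif_neg (by simp)]
    · have hshape : ['_'].intercalate (ps ++ [q]) = ['_'].intercalate ps ++ '_' :: q :=
        intercalate_snoc ps q hps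
      have hmem : '_' ∈ ['_'].intercalate (ps ++ [q]) := by
        rw [hshape]; exact List.mem_append.mpr (Or.inr List.mem_cons_self)
      have hcount : 1 ≤ PySem.Chars.count (['_'].intercalate (ps ++ [q])) ['_'] := by
        rw [count_single]; exact List.count_pos_iff.mpr hmem
      have hlen : 2 ≤ (ps ++ [q]).length := by
        rcases ps with _ | ⟨a, b⟩
        · exact absurd rfl hps
        · simp
      rw [loopA, auxR, dif_pos hcount, dif_pos hlen]
      by_cases hg : g.contains (String.mk (['_'].intercalate (ps ++ [q]))) = true
      · rw [if_pos hg, if_pos hg]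
      · rw [if_neg hg, if_neg hg]
        have hr : pvRsplit1 (['_'].intercalate (ps ++ [q])) = (['_'].intercalate ps, q) := by
          rw [hshape, pvRsplit1_append _ _ (List.mem_cons_self), pvRsplit1_sep q hq]
          simp
        rw [hr]
        rw [ih hps (fun p hp => hnp p (List.mem_append.mpr (Or.inl hp)))]
        rw [List.dropLast_concat]
        simp

lemma loopB_eq_auxR (g : PySem.Dict String String) (parts : List (List Char)) :
    ∀ j, 1 ≤ j → j ≤ parts.length →
    loopB g parts j = auxR g (parts.take j) ((parts.drop j).map String.mk) := by
  intro j
  induction j with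
  | zero => intro h; omega
  | succ n ihn =>
    intro h1 hlen
    cases n with
    | zero =>
      -- j = 1: the range is empty, B returns parts
      rcases parts with _ | ⟨p, rest⟩
      · exact absurd hlen (by simp)
      · rw [loopB, dif_neg (by omega), auxR, dif_neg (by simp)]
        simp [List.intercalate]
    | succ m =>
      -- j = m + 2
      simp only [show m + 1 + 1 = m + 2 from rfl] at hlen ⊢
      have hlt : m + 1 < parts.length := by omega
      have hjoin : PySem.Chars.join ['_'] (parts.take (m + 2)) = ['_'].intercalate (parts.take (m + 2)) := rfl
      have hlen2 : 2 ≤ (parts.take (m + 2)).length := by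
        rw [List.length_take]; omega
      rw [loopB, dif_pos (by omega), auxR, dif_pos hlen2, hjoin]
      by_cases hg : g.contains (String.mk (['_'].intercalate (parts.take (m + 2)))) = true
      · rw [if_pos hg, if_pos hg]
      · rw [if_neg hg, if_neg hg]
        have hdl : (parts.take (m + 2)).dropLast = parts.take (m + 1) := by
          rcases eq_or_lt_of_le hlen with heq | hlt2
          · have h2 : m + 2 = parts.length := by omega
            rw [h2, List.take_length, List.dropLast_eq_take]
            congr 1
            omega
          · rw [List.dropLast_take hlt2]
            norm_num
        have hgl : ∀ h', (parts.take (m + 2)).getLast h' = parts[m + 1]'hlt := by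
          intro h'
          rw [List.getLast_eq_getElem]
          simp only [List.getElem_take]
          congr 1
          rw [List.length_take]
          omega
        have hdrop : parts.drop (m + 1) = parts[m + 1] :: parts.drop (m + 2) :=
          List.drop_eq_getElem_cons hlt
        rw [show m + 2 - 1 = m + 1 from rfl, ihn (by omega) (by omega), hdl, hdrop]
        simp only [List.map_cons, hgl]

-- ===== VERDICT (by name: the statement is the Claim_ definition above) =====
theorem replace_ligatures_py_spec : Claim_equal_replace_ligatures_py := by
  intro name cfg _dom _pre
  unfold Spec_replace_ligatures_py replace_ligatures_py replace_ligatures_py_alt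
  rw [chars_splitOn_single]
  set g : PySem.Dict String String := ⟨(PySem.Dict.get? ⟨cfg⟩ "glyphnames").getD []⟩ with hg
  set ps := List.splitOnP (· == '_') name.toList with hps
  have hne : ps ≠ [] := List.splitOnP_ne_nil _ _
  have h1 : 1 ≤ ps.length := List.length_pos_of_ne_nil hne
  rw [loopB_eq_auxR g ps ps.length h1 le_rfl, List.take_length, List.drop_length]
  have hic : ['_'].intercalate ps = name.toList := List.intercalate_splitOn name.toList '_'
  rw [← hic]
  exact loopA_eq_auxR g ps hne (fun p hp => not_mem_splitOnP name.toList p hp) []
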